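-- pv_equiv track=rewrite | github.com/daniel-reich/ubiquitous-fiesta | djJpmZPPBx3JaAqcK_17.py | maya_number
-- ===== SOURCE A (Python) =====
-- def maya_number(n):
--   if n:
--     A=[]
--     while n>0:
--       A.append(divmod(n,20)[-1])
--       n=divmod(n,20)[0]
--     B=[]
--     for x in A:
--       if x:
--         B.append(divmod(x,5)[-1]*'o'+divmod(x,5)[0]*'-')
--       else:
--         B.append('@')
--     return B[::-1]
--   return ['@']
-- ===== SOURCE B (Python) =====
-- def maya_number(n):
--   def sym(x):
--     return '@' if x == 0 else (x % 5) * 'o' + (x // 5) * '-'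
--   def go(m):
--     if m <= 0:
--       return []
--     return go(m // 20) + [sym(m % 20)]
--   return ['@'] if n == 0 else go(n)
-- ===== Notes on version B (the rewrite author's own statement) =====
-- stated objective: simpler
-- what changed: Replaces A's two-pass scheme (while-loop collecting digits, a second for-loop encoding glyphs, then a reversal) by a single recursion on the quotient by the base that emits glyphs most-significant-first, with a digit encoder sym(x).
import Mathlib
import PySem

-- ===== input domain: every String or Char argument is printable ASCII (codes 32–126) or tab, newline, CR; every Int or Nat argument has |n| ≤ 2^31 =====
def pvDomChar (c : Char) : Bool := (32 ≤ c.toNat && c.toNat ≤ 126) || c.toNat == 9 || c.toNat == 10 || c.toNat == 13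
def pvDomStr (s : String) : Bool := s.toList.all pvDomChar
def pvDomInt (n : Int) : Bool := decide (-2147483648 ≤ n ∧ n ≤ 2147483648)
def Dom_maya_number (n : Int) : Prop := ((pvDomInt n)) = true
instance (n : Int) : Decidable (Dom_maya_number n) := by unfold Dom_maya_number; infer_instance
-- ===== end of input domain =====

-- B replaces A's two-pass digit-then-glyph construction (while-loop + for-loop + reversal)
-- by a single recursion on the quotient by the base emitting glyphs most-significant-first; same values, similar cost.


-- ===== PORT A =====
-- while n > 0: A.append(divmod(n,20)[-1]); n = divmod(n,20)[0]
def mayaWhile (n : Int) (A : List Int) : List Int :=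
  if n > 0 then mayaWhile (PySem.Int.floordiv n 20) (A ++ [PySem.Int.mod n 20]) else A
termination_by n.toNat
decreasing_by
  rename_i h
  rw [PySem.Int.floordiv_eq_ediv_of_pos (by omega : (0:Int) < 20)]
  omega

-- divmod(x,5)[-1]*'o' + divmod(x,5)[0]*'-'  (string repetition via PySem.List.pyRepeat on code points)
def mayaGlyphA (x : Int) : String :=
  String.ofList (PySem.List.pyRepeat ['o'] (PySem.Int.mod x 5) ++ PySem.List.pyRepeat ['-'] (PySem.Int.floordiv x 5))

def maya_number (n : Int) : List String :=
  if n ≠ 0 then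
    let A := mayaWhile n []
    let B := A.foldl (fun acc x => acc ++ [if x ≠ 0 then mayaGlyphA x else "@"]) []
    -- B[::-1]: step -1 is never 0, so slice? is some; getD only discharges the option
    (PySem.List.slice? B none none (-1)).getD []
  else ["@"]

-- ===== PORT B =====
def mayaSym (x : Int) : String :=
  if x == 0 then "@"
  else String.ofList (PySem.List.pyRepeat ['o'] (PySem.Int.mod x 5) ++ PySem.List.pyRepeat ['-'] (PySem.Int.floordiv x 5))

def mayaGo (m : Int) : List String :=
  if m ≤ 0 then []
  else mayaGo (PySem.Int.floordiv m 20) ++ [mayaSym (PySem.Int.mod m 20)]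
termination_by m.toNat
decreasing_by
  rename_i h
  rw [PySem.Int.floordiv_eq_ediv_of_pos (by omega : (0:Int) < 20)]
  omega

def maya_number_alt (n : Int) : List String :=
  if n == 0 then ["@"] else mayaGo n

-- ===== PRECONDITION & SPEC =====
def Spec_maya_number (n : Int) (out : List String) : Prop := out = maya_number_alt n
instance (n : Int) (out : List String) : Decidable (Spec_maya_number n out) := by unfold Spec_maya_number; infer_instance

-- ===== CLAIM (what is proved, stated in full; the proofs are below) =====
def Claim_equal_maya_number : Prop := ∀ (n : Int), Dom_maya_number n → Spec_maya_number n (maya_number n)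

-- ===== LEMMAS AND PROOFS =====

-- A's glyph branch computes B's sym
theorem mayaGlyph_eq_sym : (fun x : Int => if ¬x = 0 then mayaGlyphA x else "@") = mayaSym := by
  funext x; by_cases h : x = 0 <;> simp [mayaGlyphA, mayaSym, h]

-- core: mapping A's glyphs over the while-loop's digit list and reversing gives B's recursion
theorem mayaWhile_key (k : Nat) : ∀ (n : Int) (acc : List Int), n.toNat ≤ k →
    ((mayaWhile n acc).map mayaSym).reverse = mayaGo n ++ (acc.map mayaSym).reverse := by
  induction k with
  | zero =>
    intro n acc h
    have hn : ¬ n > 0 := by omega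
    rw [mayaWhile, mayaGo]
    simp [hn, show n ≤ 0 by omega]
  | succ k ih =>
    intro n acc h
    by_cases hn : n > 0
    · rw [mayaWhile, mayaGo]
      simp only [hn, if_pos, show ¬ n ≤ 0 by omega, if_neg, not_false_iff]
      rw [ih _ _ (by rw [PySem.Int.floordiv_eq_ediv_of_pos (by omega : (0:Int) < 20)]; omega)]
      simp
    · rw [mayaWhile, mayaGo]
      simp [hn, show n ≤ 0 by omega]

theorem maya_number_spec : Claim_equal_maya_number := by
  intro n _
  unfold Spec_maya_number maya_number maya_number_alt
  by_cases h : n = 0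
  · simp [h]
  · simp only [h, ne_eq, not_false_iff, if_pos, beq_iff_eq, if_neg]
    rw [PySem.List.foldl_append_singleton_eq_map]
    rw [PySem.List.slice?_none_none_neg_one]
    have := mayaWhile_key n.toNat n [] (le_refl _)
    simp at this
    rw [mayaGlyph_eq_sym]
    simpa using this

-- ===== VERDICT (by name: the statement is the Claim_ definition above) =====
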